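-- pv_equiv track=rewrite | github.com/joanna-salek/master_thesis | classic_free_aligment/complexity_z/complexity_z.py | word_seq
-- ===== SOURCE A (Python) =====
-- def word_seq(seq):
--     data = []
--     length = len(seq)
--     i = 0
--     k = 1
--     while i < length:
--         while seq[i:i + k] in data and i + k < length:
--             k += 1
--         if seq[i:i + k] not in data:
--             data.append(seq[i:i + k])
--         i += k
--         k = 1
--     return data
-- ===== SOURCE B (Python) =====
-- def word_seq(seq):
--     # One-pass LZ78 automaton: stream each character through a flat transition
--     # table {(state, symbol): state}; a missing transition ends the phrase.
--     trans = {}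
--     out = []
--     n = len(seq)
--     state = 0      # id of the currently matched phrase (0 = empty)
--     start = 0      # start index of the current phrase
--     next_id = 1
--     for j, c in enumerate(seq):
--         key = (state, c)
--         if key in trans and j + 1 < n:
--             state = trans[key]
--         else:
--             if key not in trans:
--                 trans[key] = next_id
--                 next_id += 1
--                 out.append(seq[start:j + 1])
--             state = 0
--             start = j + 1
--     return out
-- ===== Notes on version B (the rewrite author's own statement) =====
-- stated objective: faster
-- what changed: B replaces A's nested while loops (re-slicing the string and linearly scanning a growing phrase list for every candidate) with a single pass over enumerate(seq) driving a flat transition-table automaton {(state,symbol): state}, emitting a phrase whenever a transition is missing.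
import Mathlib
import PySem

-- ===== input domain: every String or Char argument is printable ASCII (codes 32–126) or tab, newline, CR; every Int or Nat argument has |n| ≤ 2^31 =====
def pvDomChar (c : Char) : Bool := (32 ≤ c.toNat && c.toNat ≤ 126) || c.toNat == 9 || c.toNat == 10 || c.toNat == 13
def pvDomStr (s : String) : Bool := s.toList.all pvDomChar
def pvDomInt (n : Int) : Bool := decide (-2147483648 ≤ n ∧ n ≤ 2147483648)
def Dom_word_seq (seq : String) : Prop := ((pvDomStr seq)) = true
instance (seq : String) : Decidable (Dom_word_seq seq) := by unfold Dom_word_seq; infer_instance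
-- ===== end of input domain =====

-- B replaces A's nested while loops (slice + linear scan of the phrase list per candidate)
-- by a single pass over enumerate(seq) driving a flat transition-table automaton;
-- return values are proved equal on all inputs.

-- ===== PORT A =====
-- seq[i:i+k] with 0 ≤ i, 0 ≤ k: exact as (toList.drop i).take k (nonnegative in-order bounds).
-- inner while: `while seq[i:i + k] in data and i + k < length: k += 1`
def innerA (s : List Char) (data : List (List Char)) (i k : Nat) : Nat :=
  if (s.drop i).take k ∈ data ∧ i + k < s.length then innerA s data i (k + 1) else k
termination_by s.length - (i + k)

theorem innerA_ge (s : List Char) (data : List (List Char)) (i k : Nat) :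
    k ≤ innerA s data i k := by
  fun_induction innerA with
  | case1 h ih => omega
  | case2 h => omega

-- outer while: advance i by the found k, append the word when new; returns data.
def loopA (s : List Char) (data : List (List Char)) (i : Nat) : List (List Char) :=
  if i < s.length then
    let k := innerA s data i 1
    let w := (s.drop i).take k
    let data' := if w ∈ data then data else data ++ [w]
    loopA s data' (i + k)
  else data
termination_by s.length - i
decreasing_by have := innerA_ge s data i 1; omega

def word_seq (seq : String) : List String := (loopA seq.toList [] 0).map String.ofList

-- ===== PORT B =====
-- loop body of Source B's `for j, c in enumerate(seq)`; running state = (trans, out, state, start, next_id).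
-- `trans[key]` is guarded by `key in trans`, so the total lookup (get? …).getD 0 is exact here.
def stepB (s : List Char) (n : Int)
    (st : PySem.Dict (Int × Char) Int × List (List Char) × Int × Int × Int)
    (jc : Int × Char) :
    PySem.Dict (Int × Char) Int × List (List Char) × Int × Int × Int :=
  match st, jc with
  | (tr, out, state, start, nid), (j, c) =>
    if tr.contains (state, c) && decide (j + 1 < n) then
      (tr, out, (tr.get? (state, c)).getD 0, start, nid)
    else if tr.contains (state, c) then
      (tr, out, 0, j + 1, nid)
    else
      (tr.insert (state, c) nid,
       out ++ [PySem.List.slice s (some start) (some (j + 1))],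
       0, j + 1, nid + 1)

def word_seq_alt (seq : String) : List String :=
  let s := seq.toList
  let r := (PySem.List.enumerate s 0).foldl (stepB s (s.length : Int))
    (PySem.Dict.empty, [], 0, 0, 1)
  r.2.1.map String.ofList

-- ===== PRECONDITION & SPEC =====
def Spec_word_seq (seq : String) (out : List String) : Prop := out = word_seq_alt seq
instance (seq : String) (out : List String) : Decidable (Spec_word_seq seq out) := by unfold Spec_word_seq; infer_instance

-- ===== CLAIM (what is proved, stated in full; the proofs are below) =====
def Claim_equal_word_seq : Prop := ∀ (seq : String), Dom_word_seq seq → Spec_word_seq seq (word_seq seq)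

-- ===== LEMMAS AND PROOFS =====

-- id that B's automaton assigns to a stored phrase: position in A's list + 1 (0 = empty phrase)
def idOf (data : List (List Char)) (p : List Char) : Int :=
  if p = [] then 0 else (data.idxOf p : Int) + 1

-- data and (trans, nid) represent the same phrase set: nid is the next free id, phrases are
-- nonempty and closed under removing the last symbol, trans is exactly the parent→child map,
-- and ids beyond the stored phrases are unused.
def InvDT (data : List (List Char)) (tr : PySem.Dict (Int × Char) Int) (nid : Int) : Prop :=
  nid = (data.length : Int) + 1 ∧
  [] ∉ data ∧
  (∀ u ∈ data, ∀ p c, u = p ++ [c] → p ≠ [] → p ∈ data) ∧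
  (∀ p c, (p = [] ∨ p ∈ data) →
      tr.get? (idOf data p, c) =
        if p ++ [c] ∈ data then some (idOf data (p ++ [c])) else none) ∧
  (∀ (m : Int) c, (data.length : Int) < m → tr.get? (m, c) = none)

theorem idOf_le (data : List (List Char)) (p : List Char) (h : p = [] ∨ p ∈ data) :
    0 ≤ idOf data p ∧ idOf data p ≤ (data.length : Int) := by
  by_cases hp : p = []
  · simp [idOf, hp]
  · rcases h with rfl | h
    · exact absurd rfl hp
    · have h1 := List.idxOf_lt_length_of_mem h
      simp [idOf, hp]; omega

theorem idOf_inj (data : List (List Char)) (p q : List Char)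
    (hp : p = [] ∨ p ∈ data) (hq : q = [] ∨ q ∈ data) (h : idOf data p = idOf data q) :
    p = q := by
  by_cases hp0 : p = [] <;> by_cases hq0 : q = []
  · rw [hp0, hq0]
  · rw [idOf, if_pos hp0, idOf, if_neg hq0] at h; omega
  · rw [idOf, if_neg hp0, idOf, if_pos hq0] at h; omega
  · rcases hp with rfl | hp
    · exact absurd rfl hp0
    rcases hq with rfl | hq
    · exact absurd rfl hq0
    rw [idOf, if_neg hp0, idOf, if_neg hq0] at h
    have h2 : data.idxOf p = data.idxOf q := by omega
    have h3 := List.getElem_idxOf (List.idxOf_lt_length_of_mem hp)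
    have h4 := List.getElem_idxOf (List.idxOf_lt_length_of_mem hq)
    rw [← h3, ← h4]
    congr 1

theorem idOf_append_stable (data : List (List Char)) (w p : List Char)
    (hp : p = [] ∨ p ∈ data) : idOf (data ++ [w]) p = idOf data p := by
  by_cases hp0 : p = []
  · simp [idOf, hp0]
  · rcases hp with rfl | hp
    · exact absurd rfl hp0
    · simp [idOf, hp0, List.idxOf_append_of_mem hp]

theorem idOf_append_self (data : List (List Char)) (w : List Char)
    (hw : w ∉ data) (hne : w ≠ []) : idOf (data ++ [w]) w = (data.length : Int) + 1 := by
  simp [idOf, hne, List.idxOf_append, hw]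

theorem InvDT_empty : InvDT [] PySem.Dict.empty 1 := by
  refine ⟨rfl, by simp, by simp, ?_, ?_⟩
  · intro p c hp; simp [PySem.Dict.get?_empty]
  · intro m c _; simp [PySem.Dict.get?_empty]

theorem InvDT_insert (data : List (List Char)) (tr : PySem.Dict (Int × Char) Int) (nid : Int)
    (p : List Char) (c : Char) (hInv : InvDT data tr nid)
    (hp : p = [] ∨ p ∈ data) (hw : p ++ [c] ∉ data) :
    InvDT (data ++ [p ++ [c]]) (tr.insert (idOf data p, c) nid) (nid + 1) := by
  obtain ⟨hnid, hne, hcl, hget, hbound⟩ := hInv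
  have hwne : p ++ [c] ≠ [] := by simp
  have hwid : idOf (data ++ [p ++ [c]]) (p ++ [c]) = (data.length : Int) + 1 :=
    idOf_append_self data _ hw hwne
  have hple := idOf_le data p hp
  refine ⟨by simp only [List.length_append, List.length_singleton]; push_cast; omega, ?_, ?_, ?_, ?_⟩
  · simp only [List.mem_append, List.mem_singleton]
    rintro (h | h)
    · exact hne h
    · exact hwne h.symm
  · intro u hu q c' hq hq0
    simp only [List.mem_append, List.mem_singleton] at hu
    rcases hu with hu | hu
    · exact List.mem_append_left _ (hcl u hu q c' hq hq0)
    · obtain ⟨rfl, rfl⟩ := List.append_singleton_inj.mp (hq ▸ hu).symm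
      rcases hp with rfl | hp
      · exact absurd rfl hq0
      · exact List.mem_append_left _ hp
  · intro q c' hq
    have hq' : (q = [] ∨ q ∈ data) ∨ q = p ++ [c] := by
      rcases hq with rfl | hq
      · exact Or.inl (Or.inl rfl)
      · rcases List.mem_append.mp hq with h | h
        · exact Or.inl (Or.inr h)
        · exact Or.inr (List.mem_singleton.mp h)
    rcases hq' with hqo | rfl
    · rw [idOf_append_stable data _ q hqo]
      by_cases hk : ((idOf data q, c') = (idOf data p, c))
      · obtain ⟨rfl, rfl⟩ : q = p ∧ c' = c := by
          have h1 := congrArg Prod.fst hk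
          have h2 := congrArg Prod.snd hk
          exact ⟨idOf_inj data q p hqo hp h1, h2⟩
        rw [PySem.Dict.get?_insert, if_pos rfl,
          if_pos (List.mem_append_right data (List.mem_singleton.mpr rfl)), hwid, hnid]
      · rw [PySem.Dict.get?_insert, if_neg hk, hget q c' hqo]
        by_cases hm : q ++ [c'] ∈ data
        · rw [if_pos hm, if_pos (List.mem_append_left _ hm),
            idOf_append_stable data _ _ (Or.inr hm)]
        · have hm' : q ++ [c'] ∉ data ++ [p ++ [c]] := by
            intro hcontra
            rcases List.mem_append.mp hcontra with h | h
            · exact hm h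
            · obtain ⟨rfl, rfl⟩ := List.append_singleton_inj.mp (List.mem_singleton.mp h)
              exact hk rfl
          rw [if_neg hm, if_neg hm']
    · rw [hwid]
      have hk : (((data.length : Int) + 1, c') ≠ (idOf data p, c)) := by
        intro hcontra
        have := congrArg Prod.fst hcontra
        simp at this; omega
      rw [PySem.Dict.get?_insert, if_neg hk]
      have hm' : (p ++ [c]) ++ [c'] ∉ data ++ [p ++ [c]] := by
        intro hcontra
        rcases List.mem_append.mp hcontra with h | h
        · exact hw (hcl _ h (p ++ [c]) c' rfl hwne)
        · have := congrArg List.length (List.mem_singleton.mp h)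
          simp at this
      rw [if_neg hm', hbound _ c' (by omega)]
  · intro m c' hm
    simp only [List.length_append, List.length_singleton] at hm
    push_cast at hm
    have hk : ((m, c') ≠ (idOf data p, c)) := by
      intro hcontra
      have := congrArg Prod.fst hcontra
      omega
    rw [PySem.Dict.get?_insert, if_neg hk]
    exact hbound m c' (by omega)

-- A's state in the middle of the inner while loop, with k = d + 1 already reached
def contA (s : List Char) (data : List (List Char)) (i d : Nat) : List (List Char) :=
  loopA s
    (if (s.drop i).take (innerA s data i (d + 1)) ∈ data then data
     else data ++ [(s.drop i).take (innerA s data i (d + 1))])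
    (i + innerA s data i (d + 1))

theorem loopA_eq_contA (s : List Char) (data : List (List Char)) (i : Nat)
    (h : i < s.length) : loopA s data i = contA s data i 0 := by
  rw [loopA, if_pos h]
  rfl

theorem take_drop_succ (s : List Char) (i d : Nat) (h : i + d < s.length) :
    (s.drop i).take (d + 1) = (s.drop i).take d ++ [s[i + d]'h] := by
  have h1 : (s.drop i)[d]? = some (s[i + d]'h) := by
    rw [List.getElem?_drop, List.getElem?_eq_getElem h]
  rw [List.take_add_one, h1]
  rfl

theorem simLoop (s : List Char) :
    ∀ (m i d : Nat) (data : List (List Char)) (tr : PySem.Dict (Int × Char) Int) (nid : Int),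
      s.length - (i + d) ≤ m →
      InvDT data tr nid →
      ((s.drop i).take d = [] ∨ (s.drop i).take d ∈ data) →
      i + d < s.length →
      ((PySem.List.enumerate (s.drop (i + d)) ((i + d : Nat) : Int)).foldl
          (stepB s (s.length : Int))
          (tr, data, idOf data ((s.drop i).take d), ((i : Nat) : Int), nid)).2.1
        = contA s data i d := by
  intro m
  induction m with
  | zero => intro i d data tr nid hm hInv hp hlt; omega
  | succ m ih =>
    intro i d data tr nid hm hInv hp hlt
    have hdrop : s.drop (i + d) = s[i + d]'hlt :: s.drop (i + d + 1) :=
      List.drop_eq_getElem_cons hlt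
    have htake : (s.drop i).take (d + 1) = (s.drop i).take d ++ [s[i + d]'hlt] :=
      take_drop_succ s i d hlt
    obtain ⟨hnid, hne, hcl, hget, hbound⟩ := hInv
    have hg := hget ((s.drop i).take d) (s[i + d]'hlt) hp
    rw [hdrop, PySem.List.enumerate_cons, List.foldl_cons]
    simp only [stepB]
    by_cases hmem : (s.drop i).take d ++ [s[i + d]'hlt] ∈ data
    · have hcont : tr.contains (idOf data ((s.drop i).take d), s[i + d]'hlt) = true := by
        rw [PySem.Dict.contains_eq_isSome_get?, hg, if_pos hmem]; rfl
      by_cases hlt2 : i + d + 1 < s.length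
      · have hdec : decide (((i + d : Nat) : Int) + 1 < (s.length : Int)) = true := by
          rw [decide_eq_true_eq]; omega
        rw [hcont, hdec, hg, if_pos hmem]
        simp only [Bool.and_self, if_true, Option.getD_some]
        have hc1 : ((i + d : Nat) : Int) + 1 = ((i + (d + 1) : Nat) : Int) := by push_cast; ring
        have hc2 : i + d + 1 = i + (d + 1) := by omega
        have hstep : innerA s data i (d + 1) = innerA s data i (d + 1 + 1) := by
          conv_lhs => rw [innerA]
          rw [if_pos ⟨htake ▸ hmem, by omega⟩]
        have hres := ih i (d + 1) data tr nid (by omega) ⟨hnid, hne, hcl, hget, hbound⟩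
          (Or.inr (htake ▸ hmem)) (by omega)
        rw [hc1, hc2, ← htake, hres]
        unfold contA
        rw [← hstep]
      · have hdec : decide (((i + d : Nat) : Int) + 1 < (s.length : Int)) = false := by
          rw [decide_eq_false_iff_not]; omega
        rw [hcont, hdec, Bool.and_false, if_neg (by simp)]
        simp only [if_true]
        have hnil : s.drop (i + d + 1) = [] := by
          rw [List.drop_eq_nil_iff]; omega
        rw [hnil, PySem.List.enumerate_nil, List.foldl_nil]
        have hk : innerA s data i (d + 1) = d + 1 := by
          rw [innerA, if_neg (by intro h; omega)]
        unfold contA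
        rw [hk, if_pos (by rw [htake]; exact hmem), loopA, if_neg (by omega)]
    · have hcont : tr.contains (idOf data ((s.drop i).take d), s[i + d]'hlt) = false := by
        rw [PySem.Dict.contains_eq_isSome_get?, hg, if_neg hmem]; rfl
      rw [hcont, Bool.false_and, if_neg (by simp)]
      simp only [Bool.false_eq_true, if_false]
      have hslice : PySem.List.slice s (some ((i : Nat) : Int)) (some (((i + d : Nat) : Int) + 1))
          = (s.drop i).take (d + 1) := by
        have hc1 : ((i + d : Nat) : Int) + 1 = ((i + d + 1 : Nat) : Int) := by push_cast; ring
        rw [hc1, PySem.List.slice_natCast]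
        congr 1
        omega
      have hk : innerA s data i (d + 1) = d + 1 := by
        rw [innerA, if_neg (by intro h; exact hmem (htake ▸ h.1))]
      have hInv' := InvDT_insert data tr nid ((s.drop i).take d) (s[i + d]'hlt)
        ⟨hnid, hne, hcl, hget, hbound⟩ hp hmem
      by_cases hlt2 : i + d + 1 < s.length
      · have hc2 : ((i + d : Nat) : Int) + 1 = (((i + d + 1) + 0 : Nat) : Int) := by
          push_cast; ring
        have hres := ih (i + d + 1) 0 (data ++ [(s.drop i).take d ++ [s[i + d]'hlt]])
          (tr.insert (idOf data ((s.drop i).take d), s[i + d]'hlt) nid) (nid + 1)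
          (by omega) hInv' (Or.inl (by simp)) (by omega)
        rw [hslice, htake]
        rw [show idOf (data ++ [(s.drop i).take d ++ [s[i + d]'hlt]])
            ((s.drop (i + d + 1)).take 0) = 0 from by simp [idOf]] at hres
        rw [show (i + d + 1) + 0 = i + d + 1 from rfl] at hres
        have hcontA : contA s data i d
            = loopA s (data ++ [(s.drop i).take (d + 1)]) (i + (d + 1)) := by
          unfold contA
          rw [hk, if_neg (by rw [htake]; exact hmem)]
        rw [hcontA, show i + (d + 1) = i + d + 1 from by omega,
          loopA_eq_contA s _ (i + d + 1) (by omega), htake, hc2, hres]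
      · have hnil : s.drop (i + d + 1) = [] := by
          rw [List.drop_eq_nil_iff]; omega
        rw [hnil, PySem.List.enumerate_nil, List.foldl_nil]
        unfold contA
        rw [hk, if_neg (by rw [htake]; exact hmem), loopA, if_neg (by omega), hslice, htake]

-- ===== VERDICT (by name: the statement is the Claim_ definition above) =====
theorem word_seq_spec : Claim_equal_word_seq := by
  intro seq _
  unfold Spec_word_seq word_seq word_seq_alt
  show List.map String.ofList (loopA seq.toList [] 0)
      = List.map String.ofList ((List.foldl (stepB seq.toList (seq.toList.length : Int))
          (PySem.Dict.empty, [], 0, 0, 1) (PySem.List.enumerate seq.toList 0)).2.1)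
  rcases Nat.eq_zero_or_pos seq.toList.length with h | h
  · have hs : seq.toList = [] := List.eq_nil_of_length_eq_zero h
    rw [hs, loopA, if_neg (by simp), PySem.List.enumerate_nil]
    rfl
  · have h0 := simLoop seq.toList seq.toList.length 0 0 [] PySem.Dict.empty 1
      (by omega) InvDT_empty (Or.inl (by simp)) (by omega)
    simp only [List.drop_zero, List.take_zero, Nat.zero_add, Nat.cast_zero] at h0
    rw [show idOf [] [] = 0 from rfl] at h0
    rw [loopA_eq_contA seq.toList [] 0 h, ← h0]
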